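-- pv_equiv track=rewrite | github.com/kbhat97/GNX-CIS | utils/sanitizer.py | escape_for_prompt
-- ===== SOURCE A (Python) =====
-- def escape_for_prompt(text: str) -> str:
--     """
--     Escape text for safe use in LLM prompts.
--
--     This prevents prompt injection by escaping special sequences.
--
--     Args:
--         text: Text to escape
--
--     Returns:
--         Escaped text safe for prompts
--     """
--     # Replace special tokens that might confuse the model
--     replacements = {
--         '<|im_start|>': '[IM_START]',
--         '<|im_end|>': '[IM_END]',
--         '[INST]': '[INSTRUCTION]',
--         '[/INST]': '[/INSTRUCTION]',
--         '###': '# # #',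
--         'System:': 'User says System:',
--         'Assistant:': 'User says Assistant:',
--     }
--
--     escaped = text
--     for old, new in replacements.items():
--         escaped = escaped.replace(old, new)
--
--     return escaped
-- ===== SOURCE B (Python) =====
-- import re
--
--
-- def escape_for_prompt(text: str) -> str:
--     """
--     Escape text for safe use in LLM prompts.
--
--     Single-pass version: one compiled regex alternation over the special
--     tokens (in the same priority order) and one re.sub scan, instead of
--     seven sequential str.replace passes.
--     """
--     replacements = {
--         '<|im_start|>': '[IM_START]',
--         '<|im_end|>': '[IM_END]',
--         '[INST]': '[INSTRUCTION]',
--         '[/INST]': '[/INSTRUCTION]',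
--         '###': '# # #',
--         'System:': 'User says System:',
--         'Assistant:': 'User says Assistant:',
--     }
--     pattern = re.compile('|'.join(re.escape(key) for key in replacements))
--     return pattern.sub(lambda m: replacements[m.group(0)], text)
-- ===== Notes on version B (the rewrite author's own statement) =====
-- stated objective: idiomatic
-- what changed: Replaces A's seven sequential full-string str.replace passes with one compiled regex alternation of the (re.escape'd) keys in dict order and a single re.sub scan that looks the replacement up per match.
import Mathlib
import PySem

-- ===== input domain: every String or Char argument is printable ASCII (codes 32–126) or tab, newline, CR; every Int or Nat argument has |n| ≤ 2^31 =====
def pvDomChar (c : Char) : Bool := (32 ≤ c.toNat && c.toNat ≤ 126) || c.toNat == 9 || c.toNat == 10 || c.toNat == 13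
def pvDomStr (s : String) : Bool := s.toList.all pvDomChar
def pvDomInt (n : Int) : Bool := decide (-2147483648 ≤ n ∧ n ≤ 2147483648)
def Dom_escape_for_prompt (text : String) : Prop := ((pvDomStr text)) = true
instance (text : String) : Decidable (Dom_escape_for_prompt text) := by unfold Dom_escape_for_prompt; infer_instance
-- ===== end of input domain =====

-- B replaces A's seven sequential str.replace passes by one regex-alternation scan in
-- key order (idiomatic single pass; same return value, no claim of speed).

-- ===== PORT A =====
-- A: a dict of replacements, then a for-loop doing escaped = escaped.replace(old, new)
-- over its items in insertion order.
def escape_for_prompt (text : String) : String :=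
  let replacements : List (String × String) :=
    [("<|im_start|>", "[IM_START]"),
     ("<|im_end|>", "[IM_END]"),
     ("[INST]", "[INSTRUCTION]"),
     ("[/INST]", "[/INSTRUCTION]"),
     ("###", "# # #"),
     ("System:", "User says System:"),
     ("Assistant:", "User says Assistant:")]
  replacements.foldl (fun escaped oldnew => PySem.Str.replace escaped oldnew.1 oldnew.2) text

-- ===== PORT B =====
-- B (Source B) compiles one regex alternation of the re.escape'd keys (in dict order) and does a
-- single pattern.sub(lambda m: replacements[m.group(0)], text).  For an alternation of
-- literal strings, re.sub is EXACTLY this hand-ported scan (exact on all strings): walk the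
-- text left to right; at each position try the alternatives in table order; on a match emit
-- that key's replacement and skip past the match, otherwise copy one character.

-- the replacements table as (key, value) over code points, in the dict's insertion order
def pvTable : List (List Char × List Char) :=
  [("<|im_start|>".toList, "[IM_START]".toList),
   ("<|im_end|>".toList, "[IM_END]".toList),
   ("[INST]".toList, "[INSTRUCTION]".toList),
   ("[/INST]".toList, "[/INSTRUCTION]".toList),
   ("###".toList, "# # #".toList),
   ("System:".toList, "User says System:".toList),
   ("Assistant:".toList, "User says Assistant:".toList)]

-- the first alternative of the table that matches at the current position (regex alternation
-- tries alternatives left to right; an empty key never matches — none occurs in the table)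
def pvFirstMatch (T : List (List Char × List Char)) (l : List Char) : Option (List Char × List Char) :=
  T.find? (fun qr => qr.1.isPrefixOf l && !qr.1.isEmpty)

-- the re.sub scan: leftmost match wins, unmatched characters are copied through
def pvScan (T : List (List Char × List Char)) (l : List Char) : List Char :=
  match l with
  | [] => []
  | c :: t =>
    match h : pvFirstMatch T (c :: t) with
    | some (q, r) => r ++ pvScan T (List.drop q.length (c :: t))
    | none => c :: pvScan T t
termination_by l.length
decreasing_by
  · have h2 := List.find?_some h
    simp only [Bool.and_eq_true, List.isPrefixOf_iff_prefix, Bool.not_eq_true',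
      List.isEmpty_eq_false_iff] at h2
    have h1 : 1 ≤ q.length := List.length_pos_iff.mpr h2.2
    simp [List.length_drop]; omega
  · simp

def escape_for_prompt_alt (text : String) : String :=
  String.ofList (pvScan pvTable text.toList)

-- ===== PRECONDITION & SPEC =====
def Spec_escape_for_prompt (text : String) (out : String) : Prop := out = escape_for_prompt_alt text
instance (text : String) (out : String) : Decidable (Spec_escape_for_prompt text out) := by unfold Spec_escape_for_prompt; infer_instance

-- ===== CLAIM (what is proved, stated in full; the proofs are below) =====
def Claim_equal_escape_for_prompt : Prop := ∀ (text : String), Dom_escape_for_prompt text → Spec_escape_for_prompt text (escape_for_prompt text)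

-- ===== LEMMAS AND PROOFS =====

-- a and b do not overlap at a shared starting position: neither is a prefix of the other
def pvNoOvl (a b : List Char) : Prop := ¬ a <+: b ∧ ¬ b <+: a

-- side conditions under which one str.replace pass with (p → r) followed by scanning with
-- table T equals scanning with (p, r) :: T (all checked by `decide` on the concrete table):
-- (1) no key of T can start inside (or equal a suffix of) the emitted replacement r,
-- (2) p cannot match strictly inside an occurrence of a key of T, and r cannot either,
-- (3) no key of T is a prefix of another (so the first match is stable).
def pvSideCond (p r : List Char) (T : List (List Char × List Char)) : Prop :=
  (∀ s ∈ r.tails, s ≠ [] → ∀ qr ∈ T, pvNoOvl qr.1 s) ∧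
  (∀ qr ∈ T, ∀ s ∈ (qr.1.drop 1).tails, s ≠ [] → pvNoOvl p s ∧ pvNoOvl r s) ∧
  T.Pairwise (fun a b => pvNoOvl a.1 b.1)

-- Bool forms of the side conditions, so `decide` can check them on the concrete table
def pvNoOvlB (a b : List Char) : Bool := !(a.isPrefixOf b) && !(b.isPrefixOf a)

def pvPairwiseB : List (List Char × List Char) → Bool
  | [] => true
  | qr :: T => (T.all fun b => pvNoOvlB qr.1 b.1) && pvPairwiseB T

def pvSideCondB (p r : List Char) (T : List (List Char × List Char)) : Bool :=
  (r.tails.all fun s => s.isEmpty || T.all fun qr => pvNoOvlB qr.1 s) &&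
  ((T.all fun qr => (qr.1.drop 1).tails.all fun s =>
      s.isEmpty || (pvNoOvlB p s && pvNoOvlB r s)) &&
   pvPairwiseB T)

-- one str.replace pass (p → r), leftmost-first, non-overlapping — the List-level shape of
-- PySem.Chars.replace for a nonempty pattern (pvReplace_eq_pass below)
def pvPass (p r : List Char) (l : List Char) : List Char :=
  match l with
  | [] => []
  | c :: t =>
    if h : p <+: (c :: t) ∧ p ≠ [] then r ++ pvPass p r (List.drop p.length (c :: t))
    else c :: pvPass p r t
termination_by l.length
decreasing_by
  · have h1 : 1 ≤ p.length := List.length_pos_iff.mpr h.2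
    simp [List.length_drop]; omega
  · simp

-- if q is a prefix of s ++ y then q and s overlap at the start
lemma pvPrefix_split {q s y : List Char} (h : q <+: s ++ y) : q <+: s ∨ s <+: q :=
  List.prefix_or_prefix_of_prefix h (List.prefix_append s y)

-- PySem.Chars.replace.go is pvPass plus an accumulator, given enough fuel
lemma pvGo_eq (old new : List Char) (hold : old ≠ []) :
    ∀ (fuel : Nat) (l acc : List Char), l.length ≤ fuel →
      PySem.Chars.replace.go old new fuel l acc = acc.reverse ++ pvPass old new l := by
  intro fuel
  induction fuel with
  | zero =>
    intro l acc hl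
    have : l = [] := List.length_eq_zero_iff.mp (Nat.le_zero.mp hl)
    subst this
    rw [PySem.Chars.replace.go, pvPass]
  | succ n ih =>
    intro l acc hl
    cases l with
    | nil =>
      rw [PySem.Chars.replace.go, pvPass]
      simp
      omega
    | cons c t =>
      by_cases hpre : old <+: (c :: t)
      · rw [PySem.Chars.replace.go]
        simp only [List.isPrefixOf_iff_prefix, hpre, if_true]
        rw [ih _ _ (by have : 1 ≤ old.length := List.length_pos_iff.mpr hold
                       simp [List.length_drop]; simp at hl; omega)]
        rw [pvPass]
        simp [hpre, hold]
      · rw [PySem.Chars.replace.go]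
        simp only [List.isPrefixOf_iff_prefix, hpre, if_false]
        rw [ih _ _ (by simp at hl ⊢; omega)]
        rw [pvPass]
        simp [hpre]

lemma pvReplace_eq_pass (s old new : List Char) (h : old ≠ []) :
    PySem.Chars.replace s old new = pvPass old new s := by
  rw [PySem.Chars.replace]
  rw [if_neg (by simp [List.isEmpty_iff, h])]
  simpa using pvGo_eq old new h s.length s [] le_rfl

-- scanning a block r that no table key can start inside just copies r
lemma pvScan_append_inert (T : List (List Char × List Char)) (r y : List Char)
    (h : ∀ s, s <:+ r → s ≠ [] → ∀ qr ∈ T, pvNoOvl qr.1 s) :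
    pvScan T (r ++ y) = r ++ pvScan T y := by
  induction r with
  | nil => simp
  | cons d r' ih =>
    have hnone : pvFirstMatch T (d :: (r' ++ y)) = none := by
      apply List.find?_eq_none.mpr
      intro qr hqr hc
      simp only [Bool.and_eq_true, List.isPrefixOf_iff_prefix, Bool.not_eq_true',
        List.isEmpty_eq_false_iff] at hc
      have hs := h (d :: r') (List.suffix_refl _) (by simp) qr hqr
      rcases pvPrefix_split (q := qr.1) (s := d :: r') (y := y) hc.1 with h1 | h1
      · exact hs.1 h1
      · exact hs.2 h1
    rw [show d :: r' ++ y = d :: (r' ++ y) by simp, pvScan]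
    split <;> rename_i h2
    · rw [hnone] at h2; cases h2
    · rw [ih (fun s hs hne qr hqr => h s (hs.trans (List.suffix_cons d r')) hne qr hqr)]
      simp

-- one pass over u ++ v copies u unchanged when p cannot start inside u
lemma pvPass_append_clean (p r u v : List Char)
    (h : ∀ s, s <:+ u → s ≠ [] → pvNoOvl p s) :
    pvPass p r (u ++ v) = u ++ pvPass p r v := by
  induction u with
  | nil => simp
  | cons d u' ih =>
    have hno : ¬ p <+: (d :: (u' ++ v)) := by
      intro hpre
      have hs := h (d :: u') (List.suffix_refl _) (by simp)
      rcases pvPrefix_split (q := p) (s := d :: u') (y := v) hpre with h1 | h1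
      · exact hs.1 h1
      · exact hs.2 h1
    rw [show d :: u' ++ v = d :: (u' ++ v) by simp, pvPass]
    rw [dif_neg (by intro hc; exact hno hc.1)]
    rw [ih (fun s hs hne => h s (hs.trans (List.suffix_cons d u')) hne)]
    simp

-- a pass cannot create a new occurrence of a (nonempty) suffix w of q1 at the front
lemma pvPass_no_new_prefix (p r q1 : List Char)
    (h : ∀ s, s <:+ q1 → s ≠ [] → pvNoOvl r s) :
    ∀ cs, ∀ w, w <:+ q1 → w ≠ [] → w <+: pvPass p r cs → w <+: cs := by
  intro cs
  induction cs with
  | nil => intro w _ hne hw; rw [pvPass] at hw; simp at hw; exact absurd hw hne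
  | cons d cs' ih =>
    intro w hmem hne hw
    rw [pvPass] at hw
    split at hw <;> rename_i hcond
    · exfalso
      have hs := h w hmem hne
      rcases pvPrefix_split (q := w) (s := r) (y := pvPass p r (List.drop p.length (d :: cs'))) hw with h1 | h1
      · exact hs.2 h1
      · exact hs.1 h1
    · cases w with
      | nil => exact absurd rfl hne
      | cons a w' =>
        rcases List.cons_prefix_cons.mp hw with ⟨rfl, hw'⟩
        by_cases hw'e : w' = []
        · subst hw'e; simpa using List.nil_prefix
        · have hmem' : w' <:+ q1 := (List.suffix_cons a w').trans hmem
          exact List.cons_prefix_cons.mpr ⟨rfl, ih w' hmem' hw'e hw'⟩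

-- the first match is preserved when the tail beyond the matched key changes
lemma pvFirstMatch_stable (T : List (List Char × List Char))
    (hpair : T.Pairwise fun a b => pvNoOvl a.1 b.1) (l X q rq : List Char)
    (hfm : pvFirstMatch T l = some (q, rq)) : pvFirstMatch T (q ++ X) = some (q, rq) := by
  induction T with
  | nil => simp [pvFirstMatch] at hfm
  | cons hd T' ih =>
    by_cases hp0 : (hd.1.isPrefixOf l && !hd.1.isEmpty) = true
    · have : hd = (q, rq) := by
        have := List.find?_cons_of_pos (p := fun qr => qr.1.isPrefixOf l && !qr.1.isEmpty)
          (l := T') hp0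
        rw [pvFirstMatch, this] at hfm
        exact Option.some.inj hfm
      subst this
      simp only [Bool.and_eq_true, List.isPrefixOf_iff_prefix, Bool.not_eq_true',
        List.isEmpty_eq_false_iff] at hp0
      rw [pvFirstMatch, List.find?_cons_of_pos]
      simp [List.isPrefixOf_iff_prefix, List.prefix_append, hp0.2]
    · have hfm' : pvFirstMatch T' l = some (q, rq) := by
        rw [pvFirstMatch, List.find?_cons_of_neg (l := T') (by simpa using hp0)] at hfm
        exact hfm
      have hqmem : (q, rq) ∈ T' := List.mem_of_find?_eq_some hfm'
      have hno : pvNoOvl hd.1 q := by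
        have := (List.pairwise_cons.mp hpair).1 (q, rq) hqmem
        exact this
      have hpred : ¬ (hd.1.isPrefixOf (q ++ X) && !hd.1.isEmpty) = true := by
        intro hc
        simp only [Bool.and_eq_true, List.isPrefixOf_iff_prefix, Bool.not_eq_true',
          List.isEmpty_eq_false_iff] at hc
        rcases pvPrefix_split (q := hd.1) (s := q) (y := X) hc.1 with h1 | h1
        · exact hno.1 h1
        · exact hno.2 h1
      rw [pvFirstMatch, List.find?_cons_of_neg (l := T') hpred]
      exact ih (List.pairwise_cons.mp hpair).2 hfm'

lemma pvNoOvl_of_bool {a b : List Char} (h : pvNoOvlB a b = true) : pvNoOvl a b := by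
  simp only [pvNoOvlB, Bool.and_eq_true, Bool.not_eq_true'] at h
  constructor
  · intro hc
    rw [← List.isPrefixOf_iff_prefix] at hc
    rw [h.1] at hc
    cases hc
  · intro hc
    rw [← List.isPrefixOf_iff_prefix] at hc
    rw [h.2] at hc
    cases hc

lemma pvPairwise_of_bool (T : List (List Char × List Char)) (h : pvPairwiseB T = true) :
    T.Pairwise (fun a b => pvNoOvl a.1 b.1) := by
  induction T with
  | nil => exact List.Pairwise.nil
  | cons qr T ih =>
    simp only [pvPairwiseB, Bool.and_eq_true, List.all_eq_true] at h
    exact List.pairwise_cons.mpr ⟨fun b hb => pvNoOvl_of_bool (h.1 b hb), ih h.2⟩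

lemma pvSideCond_of_bool (p r : List Char) (T : List (List Char × List Char))
    (h : pvSideCondB p r T = true) : pvSideCond p r T := by
  simp only [pvSideCondB, Bool.and_eq_true, List.all_eq_true] at h
  obtain ⟨h1, h2, h3⟩ := h
  refine ⟨?_, ?_, pvPairwise_of_bool T h3⟩
  · intro s hs hne qr hqr
    have := h1 s hs
    simp only [Bool.or_eq_true, List.isEmpty_iff, List.all_eq_true] at this
    rcases this with he | hall
    · exact absurd he hne
    · exact pvNoOvl_of_bool (hall qr hqr)
  · intro qr hqr s hs hne
    have := h2 qr hqr
    have := this s hs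
    simp only [Bool.or_eq_true, List.isEmpty_iff, Bool.and_eq_true] at this
    rcases this with he | hb
    · exact absurd he hne
    · exact ⟨pvNoOvl_of_bool hb.1, pvNoOvl_of_bool hb.2⟩

-- key lemma: one replace pass with (p → r) then scanning with T = scanning with (p,r) :: T
lemma pvCrux (p r : List Char) (T : List (List Char × List Char)) (hp : p ≠ [])
    (hsc : pvSideCond p r T) :
    ∀ l, pvScan T (pvPass p r l) = pvScan ((p, r) :: T) l := by
  obtain ⟨hC1t, hC24t, hC3⟩ := hsc
  have hC1 : ∀ s, s <:+ r → s ≠ [] → ∀ qr ∈ T, pvNoOvl qr.1 s :=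
    fun s hs => hC1t s ((List.mem_tails _ _).mpr hs)
  have hC24 : ∀ qr ∈ T, ∀ s, s <:+ (qr.1.drop 1) → s ≠ [] → pvNoOvl p s ∧ pvNoOvl r s :=
    fun qr hqr s hs => hC24t qr hqr s ((List.mem_tails _ _).mpr hs)
  suffices H : ∀ n l, l.length ≤ n → pvScan T (pvPass p r l) = pvScan ((p, r) :: T) l from
    fun l => H l.length l le_rfl
  intro n
  induction n with
  | zero =>
    intro l hl
    have : l = [] := List.length_eq_zero_iff.mp (Nat.le_zero.mp hl)
    subst this
    rw [pvPass]; rw [pvScan, pvScan]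
  | succ n ih =>
    intro l hl
    cases l with
    | nil => rw [pvPass]; rw [pvScan, pvScan]
    | cons c cs =>
      by_cases hpl : p <+: (c :: cs)
      · -- p matches at the head: both sides emit r and continue past it
        rw [pvPass, dif_pos ⟨hpl, hp⟩]
        rw [pvScan_append_inert T r _ hC1]
        have hdlen : (List.drop p.length (c :: cs)).length ≤ n := by
          have : 1 ≤ p.length := List.length_pos_iff.mpr hp
          simp at hl ⊢; omega
        rw [ih _ hdlen]
        have hfm : pvFirstMatch ((p, r) :: T) (c :: cs) = some (p, r) := by
          rw [pvFirstMatch, List.find?_cons_of_pos]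
          simp [List.isPrefixOf_iff_prefix, hpl, hp]
        conv_rhs => rw [pvScan]
        split <;> rename_i h2
        · rename_i q2 r2; rw [hfm] at h2; cases h2; rfl
        · rw [hfm] at h2; cases h2
      · rw [pvPass, dif_neg (by intro hc; exact hpl hc.1)]
        cases hfm : pvFirstMatch T (c :: cs) with
        | none =>
          -- no key matches: both sides copy c
          have hnone2 : pvFirstMatch T (c :: pvPass p r cs) = none := by
            apply List.find?_eq_none.mpr
            intro qr hqr hc
            have hq0 := List.find?_eq_none.mp hfm qr hqr
            simp only [Bool.and_eq_true, List.isPrefixOf_iff_prefix, Bool.not_eq_true',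
              List.isEmpty_eq_false_iff] at hc
            obtain ⟨hpre, hqe⟩ := hc
            apply hq0
            simp only [Bool.and_eq_true, List.isPrefixOf_iff_prefix, Bool.not_eq_true',
              List.isEmpty_eq_false_iff]
            refine ⟨?_, hqe⟩
            cases hq : qr.1 with
            | nil => exact absurd hq hqe
            | cons b q1 =>
              rw [hq] at hpre
              rcases List.cons_prefix_cons.mp hpre with ⟨rfl, hq1⟩
              by_cases hq1e : q1 = []
              · subst hq1e
                exact List.cons_prefix_cons.mpr ⟨rfl, List.nil_prefix⟩
              · have hq1cs : q1 <+: cs := by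
                  have hcond : ∀ s, s <:+ q1 → s ≠ [] → pvNoOvl r s :=
                    fun s hs hne => (hC24 qr hqr s (by rw [hq]; simpa using hs) hne).2
                  exact pvPass_no_new_prefix p r q1 hcond cs q1 (List.suffix_refl _) hq1e hq1
                exact List.cons_prefix_cons.mpr ⟨rfl, hq1cs⟩
          have hfm2 : pvFirstMatch ((p, r) :: T) (c :: cs) = none := by
            rw [pvFirstMatch, List.find?_cons_of_neg]
            · exact hfm
            · simp [List.isPrefixOf_iff_prefix, hpl]
          rw [pvScan]
          split <;> rename_i h2
          · rw [hnone2] at h2; cases h2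
          · conv_rhs => rw [pvScan]
            split <;> rename_i h3
            · rw [hfm2] at h3; cases h3
            · rw [ih cs (by simp at hl; omega)]
        | some qrq =>
          obtain ⟨q, rq⟩ := qrq
          have hqfacts := List.find?_some hfm
          simp only [Bool.and_eq_true, List.isPrefixOf_iff_prefix, Bool.not_eq_true',
            List.isEmpty_eq_false_iff] at hqfacts
          obtain ⟨hqpre, hqne⟩ := hqfacts
          cases q with
          | nil => exact absurd rfl hqne
          | cons a q1 =>
            rcases List.cons_prefix_cons.mp hqpre with ⟨rfl, hq1⟩
            obtain ⟨rest, hrest⟩ := hq1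
            have hqmem : (a :: q1, rq) ∈ T := List.mem_of_find?_eq_some hfm
            have hclean : pvPass p r cs = q1 ++ pvPass p r rest := by
              rw [← hrest]
              exact pvPass_append_clean p r q1 rest
                (fun s hs hne => (hC24 (a :: q1, rq) hqmem s (by simpa using hs) hne).1)
            rw [hclean]
            have hfmQ : pvFirstMatch T (a :: (q1 ++ pvPass p r rest)) = some (a :: q1, rq) := by
              have := pvFirstMatch_stable T hC3 (a :: cs) (pvPass p r rest) (a :: q1) rq hfm
              simpa using this
            have hlen : rest.length ≤ n := by
              have : cs.length = q1.length + rest.length := by rw [← hrest]; simp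
              simp at hl; omega
            rw [pvScan]
            split <;> rename_i h2
            · rename_i q2 r2
              rw [hfmQ] at h2
              cases h2
              have hdrop : List.drop (a :: q1).length (a :: (q1 ++ pvPass p r rest))
                  = pvPass p r rest := by simp
              rw [hdrop, ih rest hlen]
              have hfm2 : pvFirstMatch ((p, r) :: T) (a :: cs) = some (a :: q1, rq) := by
                rw [pvFirstMatch, List.find?_cons_of_neg]
                · exact hfm
                · simp [List.isPrefixOf_iff_prefix, hpl]
              conv_rhs => rw [pvScan]
              split <;> rename_i h3
              · rename_i q3 r3
                rw [hfm2] at h3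
                cases h3
                have hdrop2 : List.drop (a :: q1).length (a :: cs) = rest := by
                  rw [← hrest]; simp
                rw [hdrop2]
              · rw [hfm2] at h3; cases h3
            · rw [hfmQ] at h2; cases h2

-- scanning with the empty table is the identity
lemma pvScan_nil_table : ∀ l, pvScan ([] : List (List Char × List Char)) l = l := by
  intro l
  induction l with
  | nil => rw [pvScan]
  | cons c t ih =>
    rw [pvScan]
    split <;> rename_i h2
    · simp [pvFirstMatch] at h2
    · rw [ih]

-- the seven sequential passes equal the single scan over the full table
lemma pvChain (l : List Char) :
    pvPass "Assistant:".toList "User says Assistant:".toList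
      (pvPass "System:".toList "User says System:".toList
        (pvPass "###".toList "# # #".toList
          (pvPass "[/INST]".toList "[/INSTRUCTION]".toList
            (pvPass "[INST]".toList "[INSTRUCTION]".toList
              (pvPass "<|im_end|>".toList "[IM_END]".toList
                (pvPass "<|im_start|>".toList "[IM_START]".toList l))))))
      = pvScan pvTable l := by
  rw [pvTable]
  rw [← pvCrux "<|im_start|>".toList "[IM_START]".toList
        [("<|im_end|>".toList, "[IM_END]".toList), ("[INST]".toList, "[INSTRUCTION]".toList), ("[/INST]".toList, "[/INSTRUCTION]".toList), ("###".toList, "# # #".toList), ("System:".toList, "User says System:".toList), ("Assistant:".toList, "User says Assistant:".toList)]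
        (by decide) (pvSideCond_of_bool _ _ _ (by decide))]
  rw [← pvCrux "<|im_end|>".toList "[IM_END]".toList
        [("[INST]".toList, "[INSTRUCTION]".toList), ("[/INST]".toList, "[/INSTRUCTION]".toList), ("###".toList, "# # #".toList), ("System:".toList, "User says System:".toList), ("Assistant:".toList, "User says Assistant:".toList)]
        (by decide) (pvSideCond_of_bool _ _ _ (by decide))]
  rw [← pvCrux "[INST]".toList "[INSTRUCTION]".toList
        [("[/INST]".toList, "[/INSTRUCTION]".toList), ("###".toList, "# # #".toList), ("System:".toList, "User says System:".toList), ("Assistant:".toList, "User says Assistant:".toList)]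
        (by decide) (pvSideCond_of_bool _ _ _ (by decide))]
  rw [← pvCrux "[/INST]".toList "[/INSTRUCTION]".toList
        [("###".toList, "# # #".toList), ("System:".toList, "User says System:".toList), ("Assistant:".toList, "User says Assistant:".toList)]
        (by decide) (pvSideCond_of_bool _ _ _ (by decide))]
  rw [← pvCrux "###".toList "# # #".toList
        [("System:".toList, "User says System:".toList), ("Assistant:".toList, "User says Assistant:".toList)]
        (by decide) (pvSideCond_of_bool _ _ _ (by decide))]
  rw [← pvCrux "System:".toList "User says System:".toList
        [("Assistant:".toList, "User says Assistant:".toList)]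
        (by decide) (pvSideCond_of_bool _ _ _ (by decide))]
  rw [← pvCrux "Assistant:".toList "User says Assistant:".toList
        []
        (by decide) (pvSideCond_of_bool _ _ _ (by decide))]
  rw [pvScan_nil_table]

-- ===== VERDICT (by name: the statement is the Claim_ definition above) =====
theorem escape_for_prompt_spec : Claim_equal_escape_for_prompt := by
  intro text _hdom
  unfold Spec_escape_for_prompt escape_for_prompt escape_for_prompt_alt
  apply String.toList_inj.mp
  simp only [List.foldl_cons, List.foldl_nil, PySem.Str.toList_replace, String.toList_ofList]
  rw [pvReplace_eq_pass _ _ _ (by decide), pvReplace_eq_pass _ _ _ (by decide),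
    pvReplace_eq_pass _ _ _ (by decide), pvReplace_eq_pass _ _ _ (by decide),
    pvReplace_eq_pass _ _ _ (by decide), pvReplace_eq_pass _ _ _ (by decide),
    pvReplace_eq_pass _ _ _ (by decide)]
  exact pvChain text.toList
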